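-- pv_equiv track=rewrite | github.com/Netflix/repokid | repokid/utils/roledata.py | _convert_repoed_service_to_sorted_perms_and_services
-- ===== SOURCE A (Python) =====
-- from typing import List
-- from typing import Set
-- from typing import Tuple
--
-- def _convert_repoed_service_to_sorted_perms_and_services(
--     repoed_services: Set[str],
-- ) -> Tuple[List[str], List[str]]:
--     """
--     Repokid stores a field RepoableServices that historically only stored services (when Access Advisor was only data).
--     Now this field is repurposed to store both services and permissions.  We can tell the difference because permissions
--     always have the form <service>:<permission>.  This function splits the contents of the field to sorted sets of
--     repoable services and permissions.
--
--     Args: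
--         repoed_services (list): List from Dynamo of repoable services and permissions
--
--     Returns:
--         list: Sorted list of repoable permissions (where there are other permissions that aren't repoed)
--         list: Sorted list of repoable services (where the entire service is removed)
--     """
--     repoable_permissions = set()
--     repoable_services = set()
--
--     for entry in repoed_services:
--         if len(entry.split(":")) == 2:
--             repoable_permissions.add(entry)
--         else:
--             repoable_services.add(entry)
--
--     return sorted(repoable_permissions), sorted(repoable_services)
-- ===== SOURCE B (Python) =====
-- from typing import List
-- from typing import Set
-- from typing import Tuple
--
--
-- def _insert_unique(xs: List[str], e: str) -> List[str]:
--     """Insert e into the sorted duplicate-free list xs, keeping it sorted and duplicate-free: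
--     scan to the insertion point, keep xs unchanged on a duplicate, else splice e in."""
--     i = 0
--     n = len(xs)
--     while i < n and not (e < xs[i]):
--         if e == xs[i]:
--             return xs
--         i += 1
--     return xs[:i] + [e] + xs[i:]
--
--
-- def _convert_repoed_service_to_sorted_perms_and_services(
--     repoed_services: Set[str],
-- ) -> Tuple[List[str], List[str]]:
--     perms: List[str] = []
--     services: List[str] = []
--     for entry in repoed_services:
--         if entry.count(":") == 1:
--             perms = _insert_unique(perms, entry)
--         else:
--             services = _insert_unique(services, entry)
--     return perms, services
-- ===== Notes on version B (the rewrite author's own statement) =====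
-- stated objective: alternative
-- what changed: B never builds sets and never calls sorted: it maintains the two result lists directly, inserting each entry into its sorted duplicate-free list by an ordered scan-and-splice insert (an online insertion sort with dedup), testing entry.count(':') == 1 in place of len(entry.split(':')) == 2.
import Mathlib
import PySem

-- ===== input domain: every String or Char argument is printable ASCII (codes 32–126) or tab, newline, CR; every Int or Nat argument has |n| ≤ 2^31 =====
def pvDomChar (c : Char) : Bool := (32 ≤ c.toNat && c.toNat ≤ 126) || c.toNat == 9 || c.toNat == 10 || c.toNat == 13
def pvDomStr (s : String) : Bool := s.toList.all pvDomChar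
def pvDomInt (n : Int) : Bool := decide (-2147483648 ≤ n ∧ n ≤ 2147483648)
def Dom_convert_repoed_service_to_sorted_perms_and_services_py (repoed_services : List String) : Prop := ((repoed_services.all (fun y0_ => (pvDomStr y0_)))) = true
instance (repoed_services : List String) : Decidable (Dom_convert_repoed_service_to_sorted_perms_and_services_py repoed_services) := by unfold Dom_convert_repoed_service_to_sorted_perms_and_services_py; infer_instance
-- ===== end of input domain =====

-- B builds no sets and calls no sort: it maintains the two result lists directly,
-- inserting each entry into its sorted duplicate-free list by an ordered
-- scan-and-splice insert (online insertion sort with dedup); objective: alternative.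

-- ===== PORT A =====
-- A: build two sets by a loop testing len(entry.split(':')) == 2, then sort each.
-- ':' is non-empty, so Python's entry.split(':') never raises; (split? · ":").getD []
-- is exact here (split? returns some for a non-empty separator).
def convert_repoed_service_to_sorted_perms_and_services_py (repoed_services : List String) : List String × List String :=
  let st := repoed_services.foldl
    (fun (st : PySem.Set String × PySem.Set String) entry =>
      if ((PySem.Str.split? entry ":").getD []).length == 2 then
        (PySem.Set.add st.1 entry, st.2)
      else
        (st.1, PySem.Set.add st.2 entry))
    (PySem.Set.empty, PySem.Set.empty)
  (PySem.List.sorted st.1 (fun x => x), PySem.List.sorted st.2 (fun x => x))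

-- ===== PORT B =====
-- B's _insert_unique as structural recursion: scan past smaller elements, keep the
-- list on a duplicate, else splice e in before the first larger element.
def pvInsertUniq : List String → String → List String
  | [], e => [e]
  | x :: xs, e =>
    if e < x then e :: x :: xs
    else if e == x then x :: xs
    else x :: pvInsertUniq xs e

def convert_repoed_service_to_sorted_perms_and_services_py_alt (repoed_services : List String) : List String × List String :=
  repoed_services.foldl
    (fun (st : List String × List String) entry =>
      if PySem.Str.count entry ":" == 1 then
        (pvInsertUniq st.1 entry, st.2)
      else
        (st.1, pvInsertUniq st.2 entry))
    ([], [])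

-- ===== PRECONDITION & SPEC =====
def Spec_convert_repoed_service_to_sorted_perms_and_services_py (repoed_services : List String) (out : List String × List String) : Prop := out = convert_repoed_service_to_sorted_perms_and_services_py_alt repoed_services
instance (repoed_services : List String) (out : List String × List String) : Decidable (Spec_convert_repoed_service_to_sorted_perms_and_services_py repoed_services out) := by unfold Spec_convert_repoed_service_to_sorted_perms_and_services_py; infer_instance

-- ===== CLAIM (what is proved, stated in full; the proofs are below) =====
def Claim_equal_convert_repoed_service_to_sorted_perms_and_services_py : Prop := ∀ (repoed_services : List String), Dom_convert_repoed_service_to_sorted_perms_and_services_py repoed_services → Spec_convert_repoed_service_to_sorted_perms_and_services_py repoed_services (convert_repoed_service_to_sorted_perms_and_services_py repoed_services)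

-- ===== LEMMAS AND PROOFS =====

-- count.go is the running count: the accumulator shifts out.
theorem pv_count_go_shift (sub : List Char) (fuel : Nat) :
    ∀ (l : List Char) (a : Nat),
      PySem.Chars.count.go sub fuel l a = a + PySem.Chars.count.go sub fuel l 0 := by
  induction fuel with
  | zero => intro l a; cases l <;> simp [PySem.Chars.count.go]
  | succ f ih =>
    intro l a
    cases l with
    | nil => simp [PySem.Chars.count.go]
    | cons c r =>
      rw [PySem.Chars.count.go, PySem.Chars.count.go]
      by_cases h : sub.isPrefixOf (c :: r) = true
      · simp only [h, if_true]
        rw [ih _ (a + 1), ih _ (0 + 1)]; omega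
      · simp only [eq_false_of_ne_true h]
        exact ih r a

-- splitOn produces exactly one more piece than there are separator occurrences.
theorem pv_splitOn_go_length (sub : List Char) (hsub : sub ≠ []) (f1 : Nat) :
    ∀ (l cur : List Char) (acc : List (List Char)) (f2 : Nat),
      l.length ≤ f1 → l.length ≤ f2 →
      (PySem.Chars.splitOn.go sub f1 l cur acc).length
        = acc.length + 1 + PySem.Chars.count.go sub f2 l 0 := by
  induction f1 with
  | zero =>
    intro l cur acc f2 h1 _
    have : l = [] := by cases l <;> simp_all
    subst this
    cases f2 <;> simp [PySem.Chars.splitOn.go, PySem.Chars.count.go]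
  | succ f ih =>
    intro l cur acc f2 h1 h2
    cases l with
    | nil => cases f2 <;> simp [PySem.Chars.splitOn.go, PySem.Chars.count.go]
    | cons c r =>
      obtain ⟨f2', rfl⟩ : ∃ f2', f2 = f2' + 1 :=
        ⟨f2 - 1, by simp only [List.length_cons] at h2; omega⟩
      simp only [List.length_cons] at h1 h2
      have hs1 : 1 ≤ sub.length := by
        cases sub
        · exact absurd rfl hsub
        · simp
      rw [PySem.Chars.splitOn.go, PySem.Chars.count.go]
      by_cases h : sub.isPrefixOf (c :: r) = true
      · simp only [h, if_true]
        have hd : (List.drop sub.length (c :: r)).length ≤ f := by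
          simp only [List.length_drop, List.length_cons]; omega
        have hd2 : (List.drop sub.length (c :: r)).length ≤ f2' := by
          simp only [List.length_drop, List.length_cons]; omega
        rw [ih _ _ _ f2' hd hd2,
          pv_count_go_shift sub f2' (List.drop sub.length (c :: r)) 1]
        simp only [List.length_cons]; omega
      · simp only [eq_false_of_ne_true h]
        exact ih r (c :: cur) acc f2' (by omega) (by omega)

-- A's test and B's test agree: len(e.split(':')) == 2  ⟺  e.count(':') == 1.
theorem pv_test_eq :
    (fun entry => ((PySem.Str.split? entry ":").getD []).length == 2)
      = (fun entry => PySem.Str.count entry ":" == 1) := by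
  funext e
  have h := pv_splitOn_go_length [':'] (by decide) (e.toList.length + 1)
      e.toList [] [] e.toList.length (by omega) (le_refl _)
  simp only [PySem.Str.split?, PySem.Chars.split?, PySem.Str.count, PySem.Chars.count]
  have hsep : ":".toList = [':'] := by decide
  rw [hsep, if_neg (by decide), if_neg (by decide)]
  simp only [Option.map_some, Option.getD_some, List.length_map, PySem.Chars.splitOn]
  rw [h]
  rw [Bool.eq_iff_iff]
  simp only [beq_iff_eq, List.length_nil]
  omega

-- membership after an ordered insert
theorem pv_mem_insertUniq (xs : List String) (e a : String) :
    a ∈ pvInsertUniq xs e ↔ a = e ∨ a ∈ xs := by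
  induction xs with
  | nil => simp [pvInsertUniq]
  | cons x r ih =>
    simp only [pvInsertUniq]
    split_ifs with h1 h2
    · simp only [List.mem_cons]
    · rw [beq_iff_eq] at h2; subst h2
      simp only [List.mem_cons]; tauto
    · simp only [List.mem_cons, ih]; tauto

-- ordered insert preserves strict sortedness
theorem pv_pairwise_insertUniq (xs : List String) (e : String)
    (h : xs.Pairwise (fun a b => a < b)) :
    (pvInsertUniq xs e).Pairwise (fun a b => a < b) := by
  induction xs with
  | nil => simp [pvInsertUniq]
  | cons x r ih =>
    rcases List.pairwise_cons.mp h with ⟨hx, hr⟩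
    simp only [pvInsertUniq]
    split_ifs with h1 h2
    · refine List.pairwise_cons.mpr ⟨?_, h⟩
      intro b hb
      rcases List.mem_cons.mp hb with rfl | hb
      · exact h1
      · exact lt_trans h1 (hx b hb)
    · exact h
    · have h2' : e ≠ x := by simpa using h2
      have hxe : x < e := lt_of_le_of_ne (not_lt.mp h1) (fun hq => h2' hq.symm)
      refine List.pairwise_cons.mpr ⟨?_, ih hr⟩
      intro b hb
      rcases (pv_mem_insertUniq r e b).mp hb with rfl | hb
      · exact hxe
      · exact hx b hb

-- the B fold splits into two independent folds over the filtered sublists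
theorem pv_fold_split (p : String → Bool) (xs : List String) :
    ∀ (P S : List String),
      xs.foldl
        (fun (st : List String × List String) entry =>
          if p entry then (pvInsertUniq st.1 entry, st.2)
          else (st.1, pvInsertUniq st.2 entry)) (P, S)
      = ((xs.filter p).foldl pvInsertUniq P,
         (xs.filter (fun e => !(p e))).foldl pvInsertUniq S) := by
  induction xs with
  | nil => intro P S; simp
  | cons x r ih =>
    intro P S
    by_cases h : p x = true <;> simp [List.foldl_cons, h, ih]

-- folding ordered inserts from [] builds sorted(set(ys))
theorem pv_fold_insert_sorted (ys : List String) :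
    ys.foldl pvInsertUniq [] = PySem.List.sorted (PySem.Set.ofList ys) (fun x => x) := by
  have key : ∀ (zs acc : List String), acc.Pairwise (fun a b => a < b) →
      ∃ r, zs.foldl pvInsertUniq acc = r ∧ r.Pairwise (fun a b => a < b) ∧
        (∀ a, a ∈ r ↔ a ∈ acc ∨ a ∈ zs) := by
    intro zs
    induction zs with
    | nil => intro acc h; exact ⟨acc, rfl, h, by simp⟩
    | cons z r ih =>
      intro acc h
      obtain ⟨w, hw, hpw, hmem⟩ := ih (pvInsertUniq acc z) (pv_pairwise_insertUniq acc z h)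
      refine ⟨w, by simpa using hw, hpw, ?_⟩
      intro a
      rw [hmem a, pv_mem_insertUniq]
      simp only [List.mem_cons]
      tauto
  obtain ⟨w, hw, hpw, hmem⟩ := key ys [] (by simp)
  rw [hw]
  symm
  apply PySem.List.sorted_eq_of_perm_of_pairwise_lt
  · rw [List.perm_ext_iff_of_nodup (hpw.imp (fun hlt => ne_of_lt hlt)) (PySem.Set.nodup_ofList ys)]
    intro a
    rw [hmem a, PySem.Set.mem_ofList]
    simp
  · exact hpw

-- A's loop partitions the input into the two sets of matching / non-matching entries.
theorem pv_partition (p : String → Bool) (xs : List String) :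
    ∀ (s t : PySem.Set String),
      xs.foldl
        (fun (st : PySem.Set String × PySem.Set String) entry =>
          if p entry then (PySem.Set.add st.1 entry, st.2)
          else (st.1, PySem.Set.add st.2 entry)) (s, t)
        = (PySem.Set.update s (xs.filter p),
           PySem.Set.update t (xs.filter (fun e => !(p e)))) := by
  induction xs with
  | nil => intro s t; simp [PySem.Set.update]
  | cons x r ih =>
    intro s t
    by_cases h : p x = true
    · simp [List.foldl_cons, h, ih, PySem.Set.update]
    · simp [List.foldl_cons, h, ih, PySem.Set.update]

-- sorting the deduplicated filtered list = inserting the filtered entries in order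
theorem pv_side (q : String → Bool) (xs : List String) :
    PySem.List.sorted (PySem.Set.update PySem.Set.empty (xs.filter q)) (fun x => x)
      = (xs.filter q).foldl pvInsertUniq [] := by
  have h : PySem.Set.update PySem.Set.empty (xs.filter q) = PySem.Set.ofList (xs.filter q) := rfl
  rw [h, pv_fold_insert_sorted]

-- ===== VERDICT (by name: the statement is the Claim_ definition above) =====
theorem convert_repoed_service_to_sorted_perms_and_services_py_spec : Claim_equal_convert_repoed_service_to_sorted_perms_and_services_py := by
  intro xs _
  unfold Spec_convert_repoed_service_to_sorted_perms_and_services_py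
  unfold convert_repoed_service_to_sorted_perms_and_services_py
  unfold convert_repoed_service_to_sorted_perms_and_services_py_alt
  rw [pv_partition, pv_test_eq, pv_fold_split]
  rw [show (fun e => !(((PySem.Str.split? e ":").getD []).length == 2))
        = (fun e => !(PySem.Str.count e ":" == 1)) from by
      funext e; rw [congrFun pv_test_eq e]]
  simp only [pv_side]
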